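-- pv_equiv track=rewrite | github.com/renahime/RenaChan.py | renachan/cogs/utils/crawler.py | check_consecutive_match
-- ===== SOURCE A (Python) =====
-- def check_consecutive_match(tag_text, title_parts):
--     # Check if the title parts appear consecutively in the tag's text
--     if not tag_text.strip():
--         return False
--
--     tag_lower = tag_text.lower()
--     last_index = 0
--     for part in title_parts:
--         part_lower = part.lower()
--         index = tag_lower.find(part_lower, last_index)
--         if index == -1:
--             return False
--         last_index = index + len(part_lower)
--     return True
-- ===== SOURCE B (Python) =====
-- def check_consecutive_match(tag_text, title_parts):
--     # Hand-rolled scanner: lowercase everything up front, then for each part walk the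
--     # remaining text with startswith, consuming the suffix after the first occurrence.
--     if not tag_text.strip():
--         return False
--     text = tag_text.lower()
--     parts = [p.lower() for p in title_parts]
--
--     def after(t, p):
--         # suffix of t after the first occurrence of p, or None if absent
--         while True:
--             if t.startswith(p):
--                 return t[len(p):]
--             if not t:
--                 return None
--             t = t[1:]
--
--     for p in parts:
--         text = after(text, p)
--         if text is None:
--             return False
--     return True
-- ===== Notes on version B (the rewrite author's own statement) =====
-- stated objective: alternative
-- what changed: Replaces the offset-threading str.find loop by a hand-rolled startswith scanner that walks and consumes the remaining text suffix for each part, with parts lowercased up front.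
import Mathlib
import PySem

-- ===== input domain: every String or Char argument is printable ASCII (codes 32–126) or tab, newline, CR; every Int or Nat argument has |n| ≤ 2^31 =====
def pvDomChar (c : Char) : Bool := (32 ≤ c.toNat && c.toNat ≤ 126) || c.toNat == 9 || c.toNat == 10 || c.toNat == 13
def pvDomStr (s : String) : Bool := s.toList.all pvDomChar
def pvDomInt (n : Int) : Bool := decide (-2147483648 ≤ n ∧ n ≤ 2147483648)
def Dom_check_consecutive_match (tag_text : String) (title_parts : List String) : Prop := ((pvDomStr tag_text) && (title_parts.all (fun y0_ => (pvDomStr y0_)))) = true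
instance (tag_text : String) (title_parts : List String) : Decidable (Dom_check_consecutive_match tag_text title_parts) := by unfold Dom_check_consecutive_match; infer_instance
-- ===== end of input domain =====

-- B replaces A's offset-threading str.find loop by a hand-rolled startswith scanner that
-- consumes the matched suffix of the lowercased text part by part; alternative decomposition, not faster.


-- ===== PORT A =====
-- the 'for part in title_parts' loop threading last_index
def ccmLoopA (tagLower : String) : List String → Int → Bool
  | [], _ => true
  | part :: rest, lastIndex =>
      let partLower := PySem.Str.lower part
      let index := PySem.Str.findFrom tagLower partLower lastIndex none
      if index = -1 then false
      else ccmLoopA tagLower rest (index + PySem.Str.len partLower)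

def check_consecutive_match (tag_text : String) (title_parts : List String) : Bool :=
  if PySem.Str.strip tag_text = "" then false
  else ccmLoopA (PySem.Str.lower tag_text) title_parts 0

-- ===== PORT B =====
-- Source B's 'after(t, p)': walk t with startswith, return the suffix after the first occurrence
def ccmAfter (p : List Char) : List Char → Option (List Char)
  | [] => if p.isPrefixOf [] then some (([] : List Char).drop p.length) else none
  | c :: t' =>
      if p.isPrefixOf (c :: t') then some ((c :: t').drop p.length)
      else ccmAfter p t'

-- Source B's 'for p in parts' loop over the consumed text
def ccmScanB : List Char → List (List Char) → Bool
  | _, [] => true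
  | t, p :: rest =>
      match ccmAfter p t with
      | none => false
      | some t' => ccmScanB t' rest

def check_consecutive_match_alt (tag_text : String) (title_parts : List String) : Bool :=
  if PySem.Str.strip tag_text = "" then false
  else ccmScanB (PySem.Str.lower tag_text).toList
        (title_parts.map (fun p => (PySem.Str.lower p).toList))

-- ===== PRECONDITION & SPEC =====
def Spec_check_consecutive_match (tag_text : String) (title_parts : List String) (out : Bool) : Prop := out = check_consecutive_match_alt tag_text title_parts
instance (tag_text : String) (title_parts : List String) (out : Bool) : Decidable (Spec_check_consecutive_match tag_text title_parts out) := by unfold Spec_check_consecutive_match; infer_instance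

-- ===== CLAIM (what is proved, stated in full; the proofs are below) =====
def Claim_equal_check_consecutive_match : Prop := ∀ (tag_text : String) (title_parts : List String), Dom_check_consecutive_match tag_text title_parts → Spec_check_consecutive_match tag_text title_parts (check_consecutive_match tag_text title_parts)

-- ===== LEMMAS AND PROOFS =====

lemma ccm_infix_iff_drop (p t : List Char) : p <:+: t ↔ ∃ j, p <+: t.drop j := by
  rw [← PySem.Chars.isIn_iff_infix, ← PySem.Chars.exists_prefix_drop_iff_isIn]

-- B's scanner computes exactly what Python's find-and-drop computes
lemma ccmAfter_eq (p t : List Char) :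
    ccmAfter p t =
      if PySem.Chars.find t p = -1 then none
      else some (t.drop ((PySem.Chars.find t p).toNat + p.length)) := by
  induction t with
  | nil =>
      by_cases hp : p = []
      · subst hp
        simp [ccmAfter, PySem.Chars.find_nil]
      · have h1 : ¬ p <:+: ([] : List Char) := by
          simpa [List.infix_nil] using hp
        have h2 : ¬ p.isPrefixOf ([] : List Char) := by
          rw [List.isPrefixOf_iff_prefix]
          simpa [List.prefix_nil] using hp
        rw [(PySem.Chars.find_eq_neg_one_iff _ _).mpr h1]
        simp [ccmAfter, h2]
  | cons c t' ih =>
      by_cases hpre : p <+: (c :: t')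
      · have hin : p <:+: (c :: t') := hpre.isInfix
        have h0 : 0 ≤ PySem.Chars.find (c :: t') p :=
          (PySem.Chars.find_nonneg_iff _ _).mpr hin
        have hsp := PySem.Chars.find_spec h0
        have hz : (PySem.Chars.find (c :: t') p).toNat = 0 := by
          by_contra hne
          exact hsp.2 0 (Nat.pos_of_ne_zero hne) (by simpa using hpre)
        have hfind : PySem.Chars.find (c :: t') p = 0 := by omega
        rw [ccmAfter, if_pos (List.isPrefixOf_iff_prefix.mpr hpre), hfind]
        norm_num
      · have hnp : ¬ p.isPrefixOf (c :: t') := by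
          rw [List.isPrefixOf_iff_prefix]; exact hpre
        rw [ccmAfter, if_neg hnp, ih]
        by_cases hf : PySem.Chars.find t' p = -1
        · have hni : ¬ p <:+: t' := (PySem.Chars.find_eq_neg_one_iff _ _).mp hf
          have hni' : ¬ p <:+: (c :: t') := by
            rw [ccm_infix_iff_drop]
            rintro ⟨j, hj⟩
            cases j with
            | zero => exact hpre (by simpa using hj)
            | succ j => exact hni ((ccm_infix_iff_drop _ _).mpr ⟨j, by simpa using hj⟩)
          rw [(PySem.Chars.find_eq_neg_one_iff _ _).mpr hni']
          simp [hf]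
        · have h0' : 0 ≤ PySem.Chars.find t' p := by
            have := PySem.Chars.neg_one_le_find t' p; omega
          have hsp' := PySem.Chars.find_spec h0'
          set j := (PySem.Chars.find t' p).toNat with hjdef
          have hin : p <:+: (c :: t') :=
            (ccm_infix_iff_drop _ _).mpr ⟨j + 1, by simpa using hsp'.1⟩
          have h0 : 0 ≤ PySem.Chars.find (c :: t') p :=
            (PySem.Chars.find_nonneg_iff _ _).mpr hin
          have hsp := PySem.Chars.find_spec h0
          set m := (PySem.Chars.find (c :: t') p).toNat with hmdef
          clear_value j m
          have hm_le : m ≤ j + 1 := by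
            by_contra hlt
            exact hsp.2 (j + 1) (by omega) (by simpa using hsp'.1)
          have hm_ne : m ≠ 0 := by
            intro hz
            exact hpre (by simpa [hz] using hsp.1)
          have hm_ge : ¬ m < j + 1 := by
            intro hlt
            have h1 : p <+: t'.drop (m - 1) := by
              have := hsp.1
              rwa [show (c :: t').drop m = t'.drop (m - 1) by
                cases m with
                | zero => omega
                | succ k => simp] at this
            exact hsp'.2 (m - 1) (by omega) h1
          have hcond : ¬ PySem.Chars.find (c :: t') p = -1 := by omega
          have hm : m = j + 1 := by omega
          simp only [if_neg hf, if_neg hcond]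
          congr 1
          rw [hm, show j + 1 + p.length = (j + p.length) + 1 from by omega,
            List.drop_succ_cons]

-- Chars-level version of A's loop
def ccmLoopAC (tag : List Char) : List String → Int → Bool
  | [], _ => true
  | part :: rest, lastIndex =>
      let p := PySem.Chars.lower part.toList
      let index := PySem.Chars.findFrom tag p lastIndex none
      if index = -1 then false
      else ccmLoopAC tag rest (index + p.length)

lemma ccmLoopA_eq (s : String) (parts : List String) (k : Int) :
    ccmLoopA s parts k = ccmLoopAC s.toList parts k := by
  induction parts generalizing k with
  | nil => simp [ccmLoopA, ccmLoopAC]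
  | cons part rest ih =>
      simp only [ccmLoopA, ccmLoopAC, PySem.Str.findFrom_eq, PySem.Str.toList_lower,
        PySem.Str.len, PySem.Str.toList_lower]
      split_ifs <;> simp [ih]

-- the core invariant: A's loop from offset k equals B's scan of the suffix from k
lemma ccm_core (tag : List Char) (parts : List String) (k : Nat) (hk : k ≤ tag.length) :
    ccmLoopAC tag parts (k : Int)
      = ccmScanB (tag.drop k) (parts.map (fun p => PySem.Chars.lower p.toList)) := by
  induction parts generalizing k with
  | nil => simp [ccmLoopAC, ccmScanB]
  | cons part rest ih =>
      simp only [ccmLoopAC, ccmScanB, List.map_cons]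
      set p := PySem.Chars.lower part.toList with hp
      rw [PySem.Chars.findFrom_natCast tag p k hk, ccmAfter_eq]
      set j := PySem.Chars.find (tag.drop k) p with hj
      by_cases hjm : j = -1
      · simp [hjm]
      · have hj0 : 0 ≤ j := by
          have := PySem.Chars.neg_one_le_find (tag.drop k) p
          omega
        have hne : (k : Int) + j ≠ -1 := by omega
        simp only [if_neg hjm, if_neg hne]
        have hpre := (PySem.Chars.find_spec (hj ▸ hj0 : (0:Int) ≤ PySem.Chars.find (tag.drop k) p)).1
        have hlen : j.toNat + p.length ≤ tag.length - k := by
          have h1 := hpre.length_le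
          have h3 := PySem.Chars.find_le_length (tag.drop k) p
          rw [← hj] at h1 h3
          simp only [List.length_drop] at h1 h3
          omega
        have hk' : k + j.toNat + p.length ≤ tag.length := by omega
        have := ih (k + j.toNat + p.length) hk'
        have hcast : ((k + j.toNat + p.length : Nat) : Int) = (k : Int) + j + p.length := by
          push_cast; omega
        rw [hcast] at this
        rw [this, List.drop_drop]
        congr 2
        omega

-- ===== VERDICT (by name: the statement is the Claim_ definition above) =====
theorem check_consecutive_match_spec : Claim_equal_check_consecutive_match := by
  intro tag_text title_parts _
  unfold Spec_check_consecutive_match check_consecutive_match check_consecutive_match_alt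
  by_cases h : PySem.Str.strip tag_text = ""
  · simp [h]
  · simp only [if_neg h]
    rw [ccmLoopA_eq]
    have := ccm_core (PySem.Str.lower tag_text).toList title_parts 0 (by omega)
    simpa [PySem.Str.toList_lower] using this
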